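-- pv_equiv track=rewrite | github.com/dhmnr/ProjectRanni | dodge_policy/analyze_recording.py | analyze_animation_durations
-- ===== SOURCE A (Python) =====
-- from collections import defaultdict, Counter
-- from typing import List, Dict, Set
--
-- def analyze_animation_durations(recordings: List[dict]) -> Dict[int, List[float]]:
--     """Analyze how long each animation typically lasts.
--
--     Returns:
--         Dict mapping anim_idx -> list of durations (in frames)
--     """
--     durations = defaultdict(list)
--
--     for rec in recordings:
--         anim_idx = rec["anim_idx"]
--         elapsed = rec["elapsed_frames"]
--
--         # Find animation transitions
--         prev_anim = None
--         start_frame = 0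
--
--         for i, (anim, el) in enumerate(zip(anim_idx, elapsed)):
--             anim = int(anim)
--             if anim != prev_anim:
--                 if prev_anim is not None and prev_anim != 0:
--                     # Animation ended, record duration
--                     duration = i - start_frame
--                     durations[prev_anim].append(duration)
--                 prev_anim = anim
--                 start_frame = i
--
--     return durations
-- ===== SOURCE B (Python) =====
-- from collections import defaultdict
-- from typing import List, Dict
--
--
-- def analyze_animation_durations(recordings: List[dict]) -> Dict[int, List[float]]:
--     """Analyze how long each animation typically lasts.
--
--     Two staged passes: mark run-start positions by zipping the value sequence
--     with its own shift, then take pairwise differences of consecutive marks.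
--
--     Returns:
--         Dict mapping anim_idx -> list of durations (in frames)
--     """
--     durations = defaultdict(list)
--     for rec in recordings:
--         vals = [int(a) for a, _ in zip(rec["anim_idx"], rec["elapsed_frames"])]
--         marks = [(0, vals[0])] if vals else []
--         marks += [(i, b) for i, (a, b) in enumerate(zip(vals, vals[1:]), 1) if b != a]
--         for (s, v), (e, _) in zip(marks, marks[1:]):
--             if v != 0:
--                 durations[v].append(e - s)
--     return durations
-- ===== Notes on version B (the rewrite author's own statement) =====
-- stated objective: alternative
-- what changed: Replaces A's single stateful scan (prev-anim/start-frame tracking) with two staged passes: first mark run-start positions by zipping the value list with its own shift, then take pairwise differences of consecutive marks (positions-and-subtraction instead of state/counter tracking).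
import Mathlib
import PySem

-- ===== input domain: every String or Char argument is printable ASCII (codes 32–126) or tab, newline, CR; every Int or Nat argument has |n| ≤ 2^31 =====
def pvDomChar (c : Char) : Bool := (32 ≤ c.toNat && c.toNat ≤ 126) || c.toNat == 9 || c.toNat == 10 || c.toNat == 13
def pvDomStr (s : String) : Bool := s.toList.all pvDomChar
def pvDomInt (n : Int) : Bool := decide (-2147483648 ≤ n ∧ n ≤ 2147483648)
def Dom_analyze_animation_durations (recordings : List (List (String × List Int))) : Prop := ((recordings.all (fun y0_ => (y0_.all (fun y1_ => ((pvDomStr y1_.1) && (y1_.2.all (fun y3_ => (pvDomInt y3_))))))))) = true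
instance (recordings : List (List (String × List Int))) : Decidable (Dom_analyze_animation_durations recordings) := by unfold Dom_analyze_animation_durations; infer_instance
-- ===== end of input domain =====

-- B replaces A's stateful prev/start-frame scan with two staged passes: mark the run-start
-- positions by zipping the values with their own shift, then pairwise-subtract consecutive
-- marks. Same cost, a different (position-based) decomposition.

-- ===== PORT A =====
-- one step of A's inner loop: state (durations, prev_anim, start_frame), element (i, (anim, el))
def pvAStep (s : PySem.Dict Int (List Int) × Option Int × Int) (p : Int × Int × Int) :
    PySem.Dict Int (List Int) × Option Int × Int :=
  if some p.2.1 ≠ s.2.1 then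
    let d :=
      match s.2.1 with
      | some pa => if pa ≠ 0 then s.1.modify pa [] (· ++ [p.1 - s.2.2]) else s.1
      | none => s.1
    (d, some p.2.1, p.1)
  else s

def pvAInner (d : PySem.Dict Int (List Int)) (ai el : List Int) : PySem.Dict Int (List Int) :=
  ((PySem.List.enumerate (ai.zip el) 0).foldl pvAStep (d, none, 0)).1

def analyze_animation_durations (recordings : List (List (String × List Int))) : List (Int × List Int) :=
  (recordings.foldl
    (fun d rec =>
      match rec.lookup "anim_idx", rec.lookup "elapsed_frames" with
      | some ai, some el => pvAInner d ai el
      | _, _ => d)  -- unreachable under Pre_ (KeyError in Python)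
    PySem.Dict.empty).items

-- ===== PORT B =====
-- marks = [(0, vals[0])] if vals else []
--       + [(i, b) for i, (a, b) in enumerate(zip(vals, vals[1:]), 1) if b != a]
-- vals[1:] on a list is exactly List.drop 1 (nonnegative slice bound)
def pvMarks (vals : List Int) : List (Int × Int) :=
  (match vals with
   | [] => []
   | x :: _ => [((0 : Int), x)]) ++
  ((PySem.List.enumerate (vals.zip (vals.drop 1)) 1).filter
      (fun p => decide (p.2.2 ≠ p.2.1))).map (fun p => (p.1, p.2.2))

-- one step of B's second pass, element ((s, v), (e, _))
def pvBStep (d : PySem.Dict Int (List Int)) (q : (Int × Int) × (Int × Int)) :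
    PySem.Dict Int (List Int) :=
  if q.1.2 ≠ 0 then d.modify q.1.2 [] (· ++ [q.2.1 - q.1.1]) else d

def pvBInner (d : PySem.Dict Int (List Int)) (ai el : List Int) : PySem.Dict Int (List Int) :=
  let vals := (ai.zip el).map (·.1)
  let marks := pvMarks vals
  (marks.zip (marks.drop 1)).foldl pvBStep d

def analyze_animation_durations_alt (recordings : List (List (String × List Int))) : List (Int × List Int) :=
  (recordings.foldl
    (fun d rec =>
      (((rec.lookup "anim_idx").bind fun ai =>
        (rec.lookup "elapsed_frames").map fun el => pvBInner d ai el)).getD d)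
    PySem.Dict.empty).items

-- ===== PRECONDITION & SPEC =====
-- Pre_ excludes exactly the recordings missing the "anim_idx" or "elapsed_frames" key,
-- on which Python A raises KeyError (B raises there too).
def Pre_analyze_animation_durations (recordings : List (List (String × List Int))) : Prop :=
  ∀ rec ∈ recordings, (rec.lookup "anim_idx").isSome ∧ (rec.lookup "elapsed_frames").isSome
instance (recordings : List (List (String × List Int))) : Decidable (Pre_analyze_animation_durations recordings) := by unfold Pre_analyze_animation_durations; infer_instance

def pvWitness_analyze_animation_durations : (List (List (String × List Int))) :=
  [[("anim_idx", [1, 1, 2]), ("elapsed_frames", [0, 1, 2])]]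

def Spec_analyze_animation_durations (recordings : List (List (String × List Int))) (out : List (Int × List Int)) : Prop := out = analyze_animation_durations_alt recordings
instance (recordings : List (List (String × List Int))) (out : List (Int × List Int)) : Decidable (Spec_analyze_animation_durations recordings out) := by unfold Spec_analyze_animation_durations; infer_instance

-- ===== CLAIM (what is proved, stated in full; the proofs are below) =====
def Claim_equal_analyze_animation_durations : Prop := ∀ (recordings : List (List (String × List Int))), Dom_analyze_animation_durations recordings → Pre_analyze_animation_durations recordings → Spec_analyze_animation_durations recordings (analyze_animation_durations recordings)

-- ===== LEMMAS AND PROOFS =====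

-- proof-only intermediate: the run table of a value list, with Int run lengths
def pvRunsAux (a c : Int) : List Int → List (Int × Int)
  | [] => [(a, c)]
  | x :: xs => if x = a then pvRunsAux a (c + 1) xs else (a, c) :: pvRunsAux x 1 xs

-- proof-only: a fold step over (value, duration) pairs
def pvRStep (d : PySem.Dict Int (List Int)) (p : Int × Int) : PySem.Dict Int (List Int) :=
  if p.1 ≠ 0 then d.modify p.1 [] (· ++ [p.2]) else d

-- proof-only: the tail of pvMarks for suffix l whose predecessor value is a, indices from i0
def pvG (i0 a : Int) (l : List Int) : List (Int × Int) :=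
  ((PySem.List.enumerate ((a :: l).zip l) i0).filter
      (fun p => decide (p.2.2 ≠ p.2.1))).map (fun p => (p.1, p.2.2))

-- proof-only: pairwise (value, position difference) of consecutive marks
def pvPm : List (Int × Int) → List (Int × Int)
  | [] => []
  | [_] => []
  | p :: q :: rest => (p.2, q.1 - p.1) :: pvPm (q :: rest)

lemma pvRunsAux_ne_nil (a c : Int) (l : List Int) : pvRunsAux a c l ≠ [] := by
  induction l generalizing a c with
  | nil => simp [pvRunsAux]
  | cons x xs ih => simp only [pvRunsAux]; split <;> simp [ih]

-- A's fold, resumed inside a run of value a with start_frame = s, at index i0,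
-- computes the fold of pvRStep over the remaining run table minus its last run
lemma pvFold_runs (l : List (Int × Int)) : ∀ (d : PySem.Dict Int (List Int)) (a s i0 : Int),
    ((PySem.List.enumerate l i0).foldl pvAStep (d, some a, s)).1
      = ((pvRunsAux a (i0 - s) (l.map (·.1))).dropLast).foldl pvRStep d := by
  induction l with
  | nil => intro d a s i0; simp [PySem.List.enumerate_nil, pvRunsAux]
  | cons x xs ih =>
    intro d a s i0
    rw [PySem.List.enumerate_cons, List.foldl_cons]
    by_cases hx : x.1 = a
    · have hstep : pvAStep (d, some a, s) (i0, x) = (d, some a, s) := by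
        simp [pvAStep, hx]
      rw [hstep, ih d a s (i0 + 1)]
      have hc : i0 + 1 - s = i0 - s + 1 := by ring
      simp [pvRunsAux, hx, hc]
    · have hstep : pvAStep (d, some a, s) (i0, x) =
          (pvRStep d (a, i0 - s), some x.1, i0) := by
        simp [pvAStep, pvRStep, hx]
      rw [hstep, ih (pvRStep d (a, i0 - s)) x.1 i0 (i0 + 1)]
      have hc : i0 + 1 - i0 = (1 : Int) := by ring
      simp only [List.map_cons, pvRunsAux, if_neg hx, hc]
      rw [List.dropLast_cons_of_ne_nil (pvRunsAux_ne_nil _ _ _), List.foldl_cons]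

lemma pvG_nil (i0 a : Int) : pvG i0 a [] = [] := by
  simp [pvG, PySem.List.enumerate_nil]

lemma pvG_cons (i0 a y : Int) (ys : List Int) :
    pvG i0 a (y :: ys) = (if y ≠ a then [(i0, y)] else []) ++ pvG (i0 + 1) y ys := by
  simp only [pvG, List.zip_cons_cons, PySem.List.enumerate_cons, List.filter_cons]
  split_ifs with h <;> simp_all

-- the pairwise differences of the marks form the run table minus its last run
lemma pvPm_g (l : List Int) : ∀ (a s i0 : Int),
    pvPm ((s, a) :: pvG i0 a l) = (pvRunsAux a (i0 - s) l).dropLast := by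
  induction l with
  | nil => intro a s i0; simp [pvG_nil, pvPm, pvRunsAux]
  | cons y ys ih =>
    intro a s i0
    rw [pvG_cons]
    by_cases hy : y = a
    · have hc : i0 + 1 - s = i0 - s + 1 := by ring
      simp only [hy, ne_eq, not_true_eq_false, List.nil_append, ite_false]
      rw [ih a s (i0 + 1), hc]
      simp [pvRunsAux]
    · simp only [ne_eq, hy, not_false_eq_true, if_pos, List.cons_append, List.nil_append]
      have : pvPm ((s, a) :: (i0, y) :: pvG (i0 + 1) y ys)
          = (a, i0 - s) :: pvPm ((i0, y) :: pvG (i0 + 1) y ys) := by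
        cases h : pvG (i0 + 1) y ys <;> simp [pvPm]
      rw [this, ih y i0 (i0 + 1)]
      have hc : i0 + 1 - i0 = (1 : Int) := by ring
      simp only [pvRunsAux, if_neg hy, hc]
      rw [List.dropLast_cons_of_ne_nil (pvRunsAux_ne_nil _ _ _)]

-- folding pvBStep over zipped consecutive marks is folding pvRStep over their pairwise table
lemma pvFold_zip_pm : ∀ (m : List (Int × Int)) (d : PySem.Dict Int (List Int)),
    (m.zip (m.drop 1)).foldl pvBStep d = (pvPm m).foldl pvRStep d := by
  intro m
  induction m with
  | nil => intro d; simp [pvPm]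
  | cons p rest ih =>
    intro d
    cases rest with
    | nil => simp [pvPm]
    | cons q rest' =>
      have hstep : pvBStep d (p, q) = pvRStep d (p.2, q.1 - p.1) := by rfl
      simp only [List.drop_succ_cons, List.drop_zero, List.zip_cons_cons, List.foldl_cons,
        pvPm, hstep]
      exact ih _

lemma pvInner_eq (d : PySem.Dict Int (List Int)) (ai el : List Int) :
    pvAInner d ai el = pvBInner d ai el := by
  unfold pvAInner pvBInner
  cases h : ai.zip el with
  | nil => simp [PySem.List.enumerate_nil, pvMarks]
  | cons x xs =>
    have hmarks : pvMarks ((x :: xs).map (·.1)) = (0, x.1) :: pvG 1 x.1 (xs.map (·.1)) := by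
      simp [pvMarks, pvG]
    rw [PySem.List.enumerate_cons, List.foldl_cons]
    have hstep : pvAStep (d, none, 0) (0, x) = (d, some x.1, 0) := by
      simp [pvAStep]
    rw [hstep, pvFold_runs xs d x.1 0 (0 + 1)]
    simp only [hmarks, pvFold_zip_pm]
    rw [pvPm_g (xs.map (·.1)) x.1 0 1]
    norm_num

-- ===== VERDICT (by name: the statement is the Claim_ definition above) =====
theorem analyze_animation_durations_spec : Claim_equal_analyze_animation_durations := by
  intro recordings _ _
  unfold Spec_analyze_animation_durations analyze_animation_durations analyze_animation_durations_alt
  congr 1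
  apply PySem.List.foldl_congr_mem
  intro d rec _
  cases rec.lookup "anim_idx" <;> cases rec.lookup "elapsed_frames" <;> simp [pvInner_eq]
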